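-- pv_equiv track=rewrite | github.com/JBKing514/AutoEhHunter | Docker/compute/hunterAgent/skills/search.py | _extract_source_urls
-- ===== SOURCE A (Python) =====
-- from typing import Any, Dict, List, Literal, Optional, Sequence, Tuple
--
-- def _extract_source_urls(tags: Sequence[str]) -> Tuple[str, str]:
--     eh_url = ""
--     ex_url = ""
--     for t in tags or []:
--         s = str(t or "").strip()
--         if not s.lower().startswith("source:"):
--             continue
--         v = s.split(":", 1)[1].strip()
--         if not v:
--             continue
--         if not v.startswith("http://") and not v.startswith("https://"):
--             v = f"https://{v}"
--         if "exhentai.org" in v: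
--             ex_url = ex_url or v
--         elif "e-hentai.org" in v:
--             eh_url = eh_url or v
--     return eh_url, ex_url
-- ===== SOURCE B (Python) =====
-- def _extract_source_urls(tags):
--     def _norm(t):
--         s = str(t or "").strip()
--         if not s.lower().startswith("source:"):
--             return None
--         v = s.split(":", 1)[1].strip()
--         if not v:
--             return None
--         return v if v.startswith(("http://", "https://")) else "https://" + v
--
--     urls = [u for u in (_norm(t) for t in (tags or [])) if u is not None]
--     ex_url = next((u for u in urls if "exhentai.org" in u), "")
--     eh_url = next((u for u in urls if "exhentai.org" not in u and "e-hentai.org" in u), "")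
--     return eh_url, ex_url
-- ===== Notes on version B (the rewrite author's own statement) =====
-- stated objective: alternative
-- what changed: Replaces the single loop with a pair of mutated string accumulators by a normalize-tags-to-URLs pass (helper returning a URL or None) followed by two independent first-match scans over the normalized list.
import Mathlib
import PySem

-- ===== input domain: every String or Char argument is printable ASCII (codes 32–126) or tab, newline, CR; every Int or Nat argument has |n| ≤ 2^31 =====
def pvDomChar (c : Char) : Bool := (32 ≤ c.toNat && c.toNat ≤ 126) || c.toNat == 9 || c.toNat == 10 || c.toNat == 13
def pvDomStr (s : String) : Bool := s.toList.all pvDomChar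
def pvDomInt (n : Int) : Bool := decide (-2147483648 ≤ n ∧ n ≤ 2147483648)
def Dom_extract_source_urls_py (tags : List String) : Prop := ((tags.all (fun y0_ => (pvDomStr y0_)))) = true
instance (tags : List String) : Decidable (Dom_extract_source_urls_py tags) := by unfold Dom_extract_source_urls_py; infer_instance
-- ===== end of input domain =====

-- ===== PORT A =====
-- one accumulator loop: per tag, normalize inline and update (eh, ex) in place.
def extract_source_urls_py (tags : List String) : String × String :=
  tags.foldl (fun (acc : String × String) t =>
    let s := PySem.Str.strip t                      -- str(t or "").strip() — str(t) = t, and "".strip() = "".strip()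
    if !(PySem.Str.startswith (PySem.Str.lower s) "source:") then acc
    else
      -- s has a ':' here, so split(":", 1) has two pieces; getD is unreachable
      let v := PySem.Str.strip (((PySem.Str.splitMax? s ":" 1).getD []).getD 1 "")
      if v == "" then acc
      else
        let v := if !(PySem.Str.startswith v "http://") && !(PySem.Str.startswith v "https://")
                 then "https://" ++ v else v
        if PySem.Str.isIn "exhentai.org" v then
          (acc.1, if acc.2 == "" then v else acc.2)
        else if PySem.Str.isIn "e-hentai.org" v then
          ((if acc.1 == "" then v else acc.1), acc.2)
        else acc) ("", "")

-- ===== PORT B =====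
-- normalize one tag to a URL, or none
def pvNorm (t : String) : Option String :=
  let s := PySem.Str.strip t                        -- str(t or "").strip()
  if !(PySem.Str.startswith (PySem.Str.lower s) "source:") then none
  else
    let v := PySem.Str.strip (((PySem.Str.splitMax? s ":" 1).getD []).getD 1 "")
    if v == "" then none
    else some (if PySem.Str.startswith v "http://" || PySem.Str.startswith v "https://"
               then v else "https://" ++ v)

def extract_source_urls_py_alt (tags : List String) : String × String :=
  let urls := tags.filterMap pvNorm
  let ex_url := (urls.find? (fun u => PySem.Str.isIn "exhentai.org" u)).getD ""
  let eh_url := (urls.find? (fun u =>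
      !(PySem.Str.isIn "exhentai.org" u) && PySem.Str.isIn "e-hentai.org" u)).getD ""
  (eh_url, ex_url)

-- ===== PRECONDITION & SPEC =====
def Spec_extract_source_urls_py (tags : List String) (out : String × String) : Prop := out = extract_source_urls_py_alt tags
instance (tags : List String) (out : String × String) : Decidable (Spec_extract_source_urls_py tags out) := by unfold Spec_extract_source_urls_py; infer_instance

-- ===== CLAIM (what is proved, stated in full; the proofs are below) =====
def Claim_equal_extract_source_urls_py : Prop := ∀ (tags : List String), Dom_extract_source_urls_py tags → Spec_extract_source_urls_py tags (extract_source_urls_py tags)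

-- ===== LEMMAS AND PROOFS =====

-- proof-only helpers: A's loop step under a name (definitionally equal to A's lambda),
-- Python's `x or y` on strings, and B's two match predicates
def pvStep (acc : String × String) (t : String) : String × String :=
  let s := PySem.Str.strip t
  if !(PySem.Str.startswith (PySem.Str.lower s) "source:") then acc
  else
    let v := PySem.Str.strip (((PySem.Str.splitMax? s ":" 1).getD []).getD 1 "")
    if v == "" then acc
    else
      let v := if !(PySem.Str.startswith v "http://") && !(PySem.Str.startswith v "https://")
               then "https://" ++ v else v
      if PySem.Str.isIn "exhentai.org" v then
        (acc.1, if acc.2 == "" then v else acc.2)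
      else if PySem.Str.isIn "e-hentai.org" v then
        ((if acc.1 == "" then v else acc.1), acc.2)
      else acc

def pvOr (a b : String) : String := if a == "" then b else a

def pvExP (u : String) : Bool := PySem.Str.isIn "exhentai.org" u
def pvEhP (u : String) : Bool :=
  !(PySem.Str.isIn "exhentai.org" u) && PySem.Str.isIn "e-hentai.org" u

lemma portA_foldl (tags : List String) :
    extract_source_urls_py tags = tags.foldl pvStep ("", "") := rfl

lemma pvOr_empty_left (b : String) : pvOr "" b = b := rfl

lemma https_append_ne_empty (x : String) : ¬("https://" ++ x = "") := by
  intro he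
  have := congrArg String.toList he
  simp at this

lemma pvOr_empty_right (a : String) : pvOr a "" = a := by
  unfold pvOr; split <;> simp_all

lemma pvNorm_ne_empty (t v : String) (h : pvNorm t = some v) : (v == "") = false := by
  unfold pvNorm at h
  cases h1 : PySem.Str.startswith (PySem.Str.lower (PySem.Str.strip t)) "source:" <;>
    cases h2 : PySem.Str.strip (((PySem.Str.splitMax? (PySem.Str.strip t) ":" 1).getD []).getD 1 "") == "" <;>
      cases h34 : PySem.Str.startswith (PySem.Str.strip (((PySem.Str.splitMax? (PySem.Str.strip t) ":" 1).getD []).getD 1 "")) "http://" || PySem.Str.startswith (PySem.Str.strip (((PySem.Str.splitMax? (PySem.Str.strip t) ":" 1).getD []).getD 1 "")) "https://" <;>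
        simp only [h1, h2, h34] at h <;> simp_all [https_append_ne_empty] <;>
          (subst v; exact https_append_ne_empty _)

lemma pvStep_norm (acc : String × String) (t : String) :
    pvStep acc t = match pvNorm t with
      | none => acc
      | some v =>
        if PySem.Str.isIn "exhentai.org" v then (acc.1, if acc.2 == "" then v else acc.2)
        else if PySem.Str.isIn "e-hentai.org" v then
          ((if acc.1 == "" then v else acc.1), acc.2)
        else acc := by
  unfold pvStep pvNorm
  cases h1 : PySem.Str.startswith (PySem.Str.lower (PySem.Str.strip t)) "source:" <;>
    cases h2 : PySem.Str.strip (((PySem.Str.splitMax? (PySem.Str.strip t) ":" 1).getD []).getD 1 "") == "" <;>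
      cases h3 : PySem.Str.startswith (PySem.Str.strip (((PySem.Str.splitMax? (PySem.Str.strip t) ":" 1).getD []).getD 1 "")) "http://" <;>
        cases h4 : PySem.Str.startswith (PySem.Str.strip (((PySem.Str.splitMax? (PySem.Str.strip t) ":" 1).getD []).getD 1 "")) "https://" <;>
          simp only [h1, h2, h3, h4] <;> simp

lemma foldl_pvStep (ts : List String) (eh ex : String) :
    ts.foldl pvStep (eh, ex) =
      (pvOr eh (((ts.filterMap pvNorm).find? pvEhP).getD ""),
       pvOr ex (((ts.filterMap pvNorm).find? pvExP).getD "")) := by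
  induction ts generalizing eh ex with
  | nil =>
    simp only [List.foldl_nil, List.filterMap_nil, List.find?_nil, Option.getD_none,
      pvOr_empty_right]
  | cons t ts ih =>
    rw [List.foldl_cons, pvStep_norm]
    cases h : pvNorm t with
    | none => simp [h, ih]
    | some v =>
      have hv := pvNorm_ne_empty t v h
      simp only [List.filterMap_cons, h]
      cases hex : PySem.Str.isIn "exhentai.org" v
      · cases heh : PySem.Str.isIn "e-hentai.org" v
        · have h1 : pvEhP v = false := by
            simp only [pvEhP, heh, Bool.and_false]
          have h2 : pvExP v = false := by unfold pvExP; exact hex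
          simp only [hex, heh, Bool.false_eq_true, if_false, ih, List.find?_cons, h1, h2]
        · have h1 : pvEhP v = true := by
            simp only [pvEhP, hex, heh, Bool.not_false, Bool.true_and]
          have h2 : pvExP v = false := by unfold pvExP; exact hex
          simp only [hex, heh, Bool.false_eq_true, Bool.true_eq_false, if_false, if_true,
            reduceIte, ih, List.find?_cons, h1, h2, Option.getD_some]
          refine Prod.ext ?_ rfl
          unfold pvOr
          split_ifs <;> simp_all
      · have h1 : pvEhP v = false := by
          simp only [pvEhP, hex, Bool.not_true, Bool.false_and]
        have h2 : pvExP v = true := by unfold pvExP; exact hex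
        simp only [hex, if_true, reduceIte, ih, List.find?_cons, h1, h2,
          Bool.false_eq_true, if_false, Option.getD_some]
        refine Prod.ext rfl ?_
        unfold pvOr
        split_ifs <;> simp_all

-- ===== VERDICT (by name: the statement is the Claim_ definition above) =====
theorem extract_source_urls_py_spec : Claim_equal_extract_source_urls_py := by
  intro tags _
  unfold Spec_extract_source_urls_py
  rw [portA_foldl, foldl_pvStep, pvOr_empty_left, pvOr_empty_left]
  rfl
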